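-- pv_equiv track=rewrite | github.com/patelrajnath/K-BERT | create_word_predictions_with_voted_selection.py | voting_choicer
-- ===== SOURCE A (Python) =====
-- from collections import Counter
--
-- def voting_choicer(items):
--     votes = []
--     joiner = '-'
--     for item in items:
--         if item and item != '[ENT]' and item != '[X]' and item != '[PAD]':
--             if item == 'O' or item == '[CLS]' or item == '[SEP]':
--                 votes.append(item)
--             else:
--                 joiner = item[1]
--                 votes.append(item[2:])
--
--     vote_labels = Counter(votes)
--     if not len(vote_labels):
--         vote_labels = {'O': 1}
--     lb = sorted(list(vote_labels), key=lambda x: vote_labels[x])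
--
--     final_lb = lb[-1]
--     if final_lb == 'O' or final_lb == '[CLS]' or final_lb == '[SEP]':
--         return final_lb
--     else:
--         return f'B{joiner}' + final_lb
-- ===== SOURCE B (Python) =====
-- def voting_choicer(items):
--     # Staged pipeline: filter kept tokens, derive joiner and normalized labels by
--     # comprehensions, dedup to first occurrences, then pick the winner with a
--     # >=-scan using list.count (no Counter, no sort).
--     specials = ('O', '[CLS]', '[SEP]')
--     kept = [it for it in items if it and it not in ('[ENT]', '[X]', '[PAD]')]
--     joiners = [it[1] for it in kept if it not in specials]
--     joiner = joiners[-1] if joiners else '-'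
--     labels = [it if it in specials else it[2:] for it in kept]
--     if not labels:
--         return 'O'
--     distinct = []
--     for lab in labels:
--         if lab not in distinct:
--             distinct.append(lab)
--     best, bestc = '', 0
--     for lab in distinct:
--         c = labels.count(lab)
--         if c >= bestc:
--             best, bestc = lab, c
--     if best in specials:
--         return best
--     return f'B{joiner}' + best
-- ===== Notes on version B (the rewrite author's own statement) =====
-- stated objective: alternative
-- what changed: B replaces A's single stateful loop + Counter + stable sort + last-element pipeline with a staged pipeline: filter kept tokens, derive the joiner and normalized labels by comprehensions, dedup labels to first occurrences, and pick the winner with a linear >=-scan using list.count (no Counter, no sort).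
import Mathlib
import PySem

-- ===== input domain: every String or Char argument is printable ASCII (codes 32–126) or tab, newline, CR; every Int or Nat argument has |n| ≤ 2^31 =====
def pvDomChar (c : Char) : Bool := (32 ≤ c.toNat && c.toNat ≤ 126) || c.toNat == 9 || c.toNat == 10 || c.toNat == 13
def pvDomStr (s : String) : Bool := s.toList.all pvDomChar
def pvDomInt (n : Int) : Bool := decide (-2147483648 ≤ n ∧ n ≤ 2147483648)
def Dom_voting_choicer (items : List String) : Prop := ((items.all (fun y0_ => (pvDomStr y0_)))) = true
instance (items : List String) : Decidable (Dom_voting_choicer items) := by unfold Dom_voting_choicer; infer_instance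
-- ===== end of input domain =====

-- B replaces A's stateful loop + Counter + stable-sort pipeline with a staged pipeline:
-- filter, two comprehensions (joiner list, normalized labels), first-occurrence dedup,
-- and a >=-scan with list.count picking the winner (objective: alternative decomposition).

-- ===== PORT A =====
-- loop body of A's 'for item in items': accumulates (votes, joiner)
def pvStepA (st : List String × Char) (item : String) : List String × Char :=
  if item ≠ "" ∧ item ≠ "[ENT]" ∧ item ≠ "[X]" ∧ item ≠ "[PAD]" then
    if item = "O" ∨ item = "[CLS]" ∨ item = "[SEP]" then
      (st.1 ++ [item], st.2)
    else
      (st.1 ++ [String.ofList (PySem.List.slice item.toList (some 2) none)],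
       PySem.List.pyGetD item.toList 1 '-')   -- item[1]; Pre_ excludes the IndexError case
  else st

def voting_choicer (items : List String) : String :=
  let st := items.foldl pvStepA ([], '-')
  let voteLabels := PySem.Dict.counter st.1
  let voteLabels := if voteLabels.size = 0 then PySem.Dict.ofList [("O", (1 : Int))] else voteLabels
  let lb := PySem.List.sorted voteLabels.keys (fun x => voteLabels.getD x 0) false
  let finalLb := PySem.List.pyGetD lb (-1) ""
  if finalLb = "O" ∨ finalLb = "[CLS]" ∨ finalLb = "[SEP]" then finalLb
  else String.ofList ('B' :: st.2 :: finalLb.toList)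

-- ===== PORT B =====
-- 'it in specials' / the kept-filter, as Bool predicates
def pvSpecB (it : String) : Bool := it == "O" || it == "[CLS]" || it == "[SEP]"
def pvKeepB (it : String) : Bool := !(it == "" || it == "[ENT]" || it == "[X]" || it == "[PAD]")
-- body of the labels comprehension: 'it if it in specials else it[2:]'
def pvNormB (it : String) : String :=
  if pvSpecB it then it else String.ofList (PySem.List.slice it.toList (some 2) none)

def voting_choicer_alt (items : List String) : String :=
  let kept := items.filter pvKeepB
  let joiners := (kept.filter (fun it => !pvSpecB it)).map
                   (fun it => PySem.List.pyGetD it.toList 1 '-')   -- it[1]; Pre_ excludes IndexError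
  let joiner := if joiners.isEmpty then '-' else PySem.List.pyGetD joiners (-1) '-'
  let labels := kept.map pvNormB
  if labels.isEmpty then "O"
  else
    let distinct := PySem.List.dedup labels   -- the first-occurrence dedup loop of Source B
    let bb := distinct.foldl (fun (b : String × Int) lab =>
        let c : Int := labels.count lab
        if c ≥ b.2 then (lab, c) else b) ("", 0)
    if pvSpecB bb.1 then bb.1
    else String.ofList ('B' :: joiner :: bb.1.toList)

-- ===== PRECONDITION & SPEC =====
-- Pre_ excludes exactly the inputs on which Python A raises IndexError: a one-character
-- token other than "O" reaches 'joiner = item[1]' (B raises there too).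
def Pre_voting_choicer (items : List String) : Prop :=
  ∀ s ∈ items, s.toList.length = 1 → s = "O"
instance (items : List String) : Decidable (Pre_voting_choicer items) := by
  unfold Pre_voting_choicer; infer_instance
def pvWitness_voting_choicer : List String := ["B-PER", "I-PER", "O", "[CLS]"]

def Spec_voting_choicer (items : List String) (out : String) : Prop := out = voting_choicer_alt items
instance (items : List String) (out : String) : Decidable (Spec_voting_choicer items out) := by unfold Spec_voting_choicer; infer_instance

-- ===== CLAIM (what is proved, stated in full; the proofs are below) =====
def Claim_equal_voting_choicer : Prop := ∀ (items : List String), Dom_voting_choicer items → Pre_voting_choicer items → Spec_voting_choicer items (voting_choicer items)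

-- ===== LEMMAS AND PROOFS =====

theorem pvGetLast?_cons_getD {α : Type} (c : α) (l : List α) (j : α) :
    ((c :: l).getLast?).getD j = (l.getLast?).getD c := by
  rcases l.eq_nil_or_concat with rfl | ⟨ys, y, rfl⟩
  · simp
  · have h1 : (c :: (ys ++ [y])).getLast? = some y := by
      rw [show c :: (ys ++ [y]) = (c :: ys) ++ [y] from rfl]
      exact List.getLast?_concat
    simp [h1]


-- A's fold, characterized by B's staged pipeline
theorem pvFoldA_char (items : List String) : ∀ (v : List String) (j : Char),
    items.foldl pvStepA (v, j)
      = (v ++ (items.filter pvKeepB).map pvNormB,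
         ((((items.filter pvKeepB).filter (fun it => !pvSpecB it)).map
             (fun it => PySem.List.pyGetD it.toList 1 '-')).getLast?).getD j) := by
  induction items with
  | nil => intro v j; simp
  | cons a t ih =>
    intro v j
    simp only [List.foldl_cons]
    by_cases hc : a ≠ "" ∧ a ≠ "[ENT]" ∧ a ≠ "[X]" ∧ a ≠ "[PAD]"
    · have hk : pvKeepB a = true := by
        simp [pvKeepB]; tauto
      by_cases hs : a = "O" ∨ a = "[CLS]" ∨ a = "[SEP]"
      · have hsb : pvSpecB a = true := by simp [pvSpecB]; tauto
        have hA : pvStepA (v, j) a = (v ++ [a], j) := by simp [pvStepA, hc, hs]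
        rw [hA, ih]
        simp [hk, hsb, pvNormB]
      · have hsb : pvSpecB a = false := by simp [pvSpecB]; tauto
        have hA : pvStepA (v, j) a
            = (v ++ [String.ofList (PySem.List.slice a.toList (some 2) none)],
               PySem.List.pyGetD a.toList 1 '-') := by simp [pvStepA, hc, hs]
        rw [hA, ih]
        simp [hk, hsb, pvNormB, pvGetLast?_cons_getD]
    · have hk : pvKeepB a = false := by
        simp [pvKeepB]; simp only [not_and_or, not_not] at hc; tauto
      have hA : pvStepA (v, j) a = (v, j) := by simp [pvStepA, hc]
      rw [hA, ih]; simp [hk]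

theorem pvInsertBy_nil {α : Type} (bf : α → α → Bool) (x : α) :
    PySem.List.insertBy bf x [] = [x] := rfl

theorem pvInsertBy_cons {α : Type} (bf : α → α → Bool) (x y : α) (ys : List α) :
    PySem.List.insertBy bf x (y :: ys)
      = if bf x y then x :: y :: ys else y :: PySem.List.insertBy bf x ys := rfl

theorem pvInsertBy_ne_nil {α : Type} (bf : α → α → Bool) (x : α) (s : List α) :
    PySem.List.insertBy bf x s ≠ [] := by
  cases s with
  | nil => simp [pvInsertBy_nil]
  | cons y ys => rw [pvInsertBy_cons]; split <;> simp

-- last element of a stable insertion into an ascending list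
theorem pvGetLast?_insertBy (f : String → Int) (x : String) :
    ∀ (s : List String), s.Pairwise (fun a b => f a ≤ f b) → ∀ m, s.getLast? = some m →
      (PySem.List.insertBy (fun a b => decide (f a < f b)) x s).getLast?
        = some (if f m ≤ f x then x else m) := by
  intro s
  induction s with
  | nil => intro _ m hm; simp at hm
  | cons a t ih =>
    intro hp m hm
    rw [pvInsertBy_cons]
    cases t with
    | nil =>
      have ham : a = m := by simpa using hm
      subst ham
      by_cases h : f x < f a
      · rw [if_pos (decide_eq_true h)]
        simp [not_le.mpr h]
      · rw [if_neg (by simp [h])]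
        simp [pvInsertBy_nil, not_lt.mp h]
    | cons b t' =>
      have hmt : (b :: t').getLast? = some m := by
        simpa [List.getLast?_cons_cons] using hm
      have hmem : m ∈ b :: t' := by
        obtain ⟨l', hl'⟩ := List.getLast?_eq_some_iff.mp hmt
        simp [hl']
      by_cases h : f x < f a
      · rw [if_pos (decide_eq_true h)]
        have hax : f a ≤ f m := (List.pairwise_cons.mp hp).1 m hmem
        have hnot : ¬ f m ≤ f x := by omega
        simp [List.getLast?_cons_cons, hmt, hnot]
      · rw [if_neg (by simp [h])]
        have ht := ih (List.pairwise_cons.mp hp).2 m hmt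
        cases hins : PySem.List.insertBy (fun a b => decide (f a < f b)) x (b :: t') with
        | nil => exact absurd hins (pvInsertBy_ne_nil _ _ _)
        | cons c cs =>
          rw [hins] at ht
          rw [List.getLast?_cons_cons]
          exact ht

-- B's >=-scan over l, with the running best count
def pvScan (f : String → Int) (l : List String) : String × Int :=
  l.foldl (fun b k => if f k ≥ b.2 then (k, f k) else b) ("", 0)

-- the scan computes exactly the last element of the stable sort by f
theorem pvScan_eq (f : String → Int) (hf : ∀ k, 0 ≤ f k) :
    ∀ (l : List String) (m : String), (PySem.List.sorted l f false).getLast? = some m →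
      pvScan f l = (m, f m) := by
  intro l
  induction l using List.reverseRecOn with
  | nil => intro m hm; simp [PySem.List.sorted] at hm
  | append_singleton l x ih =>
    intro m hm
    have hsplit : PySem.List.sorted (l ++ [x]) f false
        = PySem.List.insertBy (fun a b => decide (f a < f b)) x (PySem.List.sorted l f false) := by
      rw [PySem.List.sorted_eq_foldl_insertBy, List.foldl_append,
          ← PySem.List.sorted_eq_foldl_insertBy]
      rfl
    rw [hsplit] at hm
    have hscan : pvScan f (l ++ [x])
        = (if f x ≥ (pvScan f l).2 then (x, f x) else pvScan f l) := by
      simp [pvScan, List.foldl_append]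
    cases hl : PySem.List.sorted l f false with
    | nil =>
      have hlnil : l = [] := (PySem.List.sorted_eq_nil_iff l f false).mp hl
      subst hlnil
      rw [hl, pvInsertBy_nil] at hm
      have hxm : x = m := by simpa using hm
      subst hxm
      have hge : (0 : Int) ≤ f x := hf x
      simp [pvScan, hge]
    | cons c cs =>
      have hne : PySem.List.sorted l f false ≠ [] := by rw [hl]; simp
      obtain ⟨m0, hm0⟩ : ∃ m0, (PySem.List.sorted l f false).getLast? = some m0 :=
        ⟨_, List.getLast?_eq_some_getLast hne⟩
      have hpw : (PySem.List.sorted l f false).Pairwise (fun a b => f a ≤ f b) :=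
        PySem.List.sorted_pairwise l f
      have hins := pvGetLast?_insertBy f x (PySem.List.sorted l f false) hpw m0 hm0
      rw [hins] at hm
      have hmval : m = if f m0 ≤ f x then x else m0 := by
        injection hm with h; exact h.symm
      rw [hscan, ih m0 hm0, hmval]
      by_cases hcmp : f m0 ≤ f x
      · simp [hcmp, ge_iff_le]
      · simp [hcmp, ge_iff_le]

-- a nonempty votes list gives a nonempty counter
theorem pvCounter_keys_ne_nil (v : List String) (hv : v ≠ []) :
    (PySem.Dict.counter v).keys ≠ [] := by
  obtain ⟨a, t, rfl⟩ := List.exists_cons_of_ne_nil hv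
  have : a ∈ (PySem.Dict.counter (a :: t)).keys := by
    rw [PySem.Dict.keys_counter]
    exact (PySem.Set.mem_ofList _ _).mpr (by simp)
  intro h; rw [h] at this; simp at this

theorem pvCounter_size_ne (v : List String) (hv : v ≠ []) :
    (PySem.Dict.counter v).size ≠ 0 := by
  have hk := pvCounter_keys_ne_nil v hv
  intro h
  apply hk
  have : (PySem.Dict.counter v).items = [] := List.length_eq_zero_iff.mp h
  simp [PySem.Dict.keys, this]

-- ===== VERDICT (by name: the statement is the Claim_ definition above) =====
theorem voting_choicer_spec : Claim_equal_voting_choicer := by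
  intro items _ _
  unfold Spec_voting_choicer voting_choicer voting_choicer_alt
  rw [pvFoldA_char items [] '-']
  simp only [List.nil_append]
  set labels := (items.filter pvKeepB).map pvNormB with hlabels
  set joiners := (((items.filter pvKeepB).filter (fun it => !pvSpecB it)).map
      (fun it => PySem.List.pyGetD it.toList 1 '-')) with hjoiners
  by_cases hv : labels = []
  · rw [hv]
    have hcond : (PySem.List.pyGetD (PySem.List.sorted
        (if (PySem.Dict.counter ([] : List String)).size = 0 then PySem.Dict.ofList [("O", (1 : Int))]
          else PySem.Dict.counter ([] : List String)).keys
        (fun x => (if (PySem.Dict.counter ([] : List String)).size = 0 then PySem.Dict.ofList [("O", (1 : Int))]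
          else PySem.Dict.counter ([] : List String)).getD x 0)) (-1) "") = "O" := by decide
    simp [hcond]
  · have hsz := pvCounter_size_ne labels hv
    have hle : labels.isEmpty = false := by
      simpa [List.isEmpty_iff] using hv
    simp only [if_neg hsz, hle, Bool.false_eq_true, if_false]
    -- joiner agreement
    have hj : (joiners.getLast?).getD '-'
        = (if joiners.isEmpty then '-' else PySem.List.pyGetD joiners (-1) '-') := by
      cases hjl : joiners with
      | nil => simp
      | cons c cs =>
        have hne : joiners ≠ [] := by rw [hjl]; simp
        rw [← hjl]
        simp [List.isEmpty_iff, hne, PySem.List.pyGetD_neg_one _ _ hne,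
          List.getLast?_eq_some_getLast hne]
    -- winner agreement
    set D := PySem.Dict.counter labels with hD
    set f : String → Int := fun x => D.getD x 0 with hfdef
    have hkeys : D.keys ≠ [] := pvCounter_keys_ne_nil labels hv
    have hfc : f = fun x => ((labels.count x : Nat) : Int) := by
      funext x; simp only [hfdef, hD]; exact PySem.Dict.getD_counter labels x
    have hf : ∀ k, 0 ≤ f k := by intro k; rw [hfc]; positivity
    have hsne : PySem.List.sorted D.keys f false ≠ [] := by
      rw [Ne, PySem.List.sorted_eq_nil_iff]; exact hkeys
    obtain ⟨m, hm⟩ : ∃ m, (PySem.List.sorted D.keys f false).getLast? = some m :=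
      ⟨_, List.getLast?_eq_some_getLast hsne⟩
    have hA1 : PySem.List.pyGetD (PySem.List.sorted D.keys f false) (-1) "" = m := by
      rw [PySem.List.pyGetD_neg_one _ _ hsne]
      have := List.getLast?_eq_some_getLast hsne
      rw [this] at hm; injection hm
    have hdd : PySem.List.dedup labels = D.keys := by
      rw [hD, PySem.Dict.keys_counter, PySem.List.dedup_eq_ofList]
    have hBscan : (PySem.List.dedup labels).foldl (fun (b : String × Int) lab =>
          let c : Int := labels.count lab
          if c ≥ b.2 then (lab, c) else b) ("", 0) = pvScan f D.keys := by
      rw [hdd, pvScan]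
      congr 1
      funext b k
      simp only [hfc]
    have hscan := pvScan_eq f hf D.keys m hm
    rw [hA1, hBscan, hscan, hj]
    -- branch conditions agree: pvSpecB m = true ↔ the Prop disjunction
    by_cases hms : m = "O" ∨ m = "[CLS]" ∨ m = "[SEP]"
    · have : pvSpecB m = true := by simp [pvSpecB]; tauto
      simp [hms, this]
    · have : pvSpecB m = false := by simp [pvSpecB]; tauto
      simp [hms, this]
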